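-- pv_equiv track=rewrite | github.com/aptlin/gaub | gaub/gaub.py | tailMax
-- ===== SOURCE A (Python) =====
-- def tailMax(givenList, start):
--     maxValue = givenList[start]
--     maxCount = start
--     count = start
--     while count < len(givenList):
--         if maxValue < givenList[count]:
--             maxValue = givenList[count]
--             maxCount = count
--         count += 1
--     return maxCount, maxValue
-- ===== SOURCE B (Python) =====
-- def tailMax(givenList, start):
--     indices = range(start, len(givenList))
--     maxValue = max(givenList[i] for i in indices)
--     maxCount = next(i for i in indices if givenList[i] == maxValue)
--     return maxCount, maxValue
-- ===== Notes on version B (the rewrite author's own statement) =====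
-- stated objective: simpler
-- what changed: Replaces the single running-max while loop over a mutable (maxCount, maxValue) state with two declarative passes over the same index range: max() for the value, then next() for its first index.
import Mathlib
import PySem

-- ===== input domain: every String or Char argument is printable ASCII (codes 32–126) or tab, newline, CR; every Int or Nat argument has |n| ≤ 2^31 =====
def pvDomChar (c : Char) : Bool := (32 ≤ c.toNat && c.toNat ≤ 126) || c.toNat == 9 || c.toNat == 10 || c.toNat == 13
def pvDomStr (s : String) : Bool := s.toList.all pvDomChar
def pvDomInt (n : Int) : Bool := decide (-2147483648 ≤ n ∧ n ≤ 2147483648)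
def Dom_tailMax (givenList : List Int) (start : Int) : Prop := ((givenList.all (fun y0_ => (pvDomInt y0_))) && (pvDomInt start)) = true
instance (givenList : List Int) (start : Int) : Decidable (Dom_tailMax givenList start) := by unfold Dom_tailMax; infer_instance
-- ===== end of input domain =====

-- B replaces A's running-max while loop by two passes over the same index range (max of the
-- values, then the first index attaining it); objective: simpler, same O(n) cost.


-- ===== PORT A =====
-- while loop: fuel (length - count).toNat bounds the remaining iterations exactly
def tailMaxLoop (givenList : List Int) (fuel : Nat) (count maxCount maxValue : Int) : Int × Int :=
  match fuel with
  | 0 => (maxCount, maxValue)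
  | f+1 =>
    if count < (givenList.length : Int) then
      if maxValue < PySem.List.pyGetD givenList count 0 then
        tailMaxLoop givenList f (count+1) count (PySem.List.pyGetD givenList count 0)
      else
        tailMaxLoop givenList f (count+1) maxCount maxValue
    else (maxCount, maxValue)

def tailMax (givenList : List Int) (start : Int) : Int × Int :=
  tailMaxLoop givenList ((givenList.length : Int) - start).toNat start start
    (PySem.List.pyGetD givenList start 0)

-- ===== PORT B =====
def tailMax_alt (givenList : List Int) (start : Int) : Int × Int :=
  let indices := PySem.List.pyRange start (givenList.length : Int) 1
  let maxValue := (PySem.List.max? (indices.map (fun i => PySem.List.pyGetD givenList i 0)) (fun y => y)).getD 0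
  let maxCount := (indices.find? (fun i => PySem.List.pyGetD givenList i 0 == maxValue)).getD 0
  (maxCount, maxValue)

-- ===== PRECONDITION & SPEC =====
-- Python A raises IndexError on givenList[start] iff start is out of range; Pre_ excludes exactly that.
def Pre_tailMax (givenList : List Int) (start : Int) : Prop :=
  -(givenList.length : Int) ≤ start ∧ start < (givenList.length : Int)
instance (givenList : List Int) (start : Int) : Decidable (Pre_tailMax givenList start) := by
  unfold Pre_tailMax; infer_instance

def pvWitness_tailMax : List Int × Int := ([3, 1, 4], 0)

def Spec_tailMax (givenList : List Int) (start : Int) (out : Int × Int) : Prop := out = tailMax_alt givenList start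
instance (givenList : List Int) (start : Int) (out : Int × Int) : Decidable (Spec_tailMax givenList start out) := by unfold Spec_tailMax; infer_instance

-- ===== CLAIM (what is proved, stated in full; the proofs are below) =====
def Claim_equal_tailMax : Prop := ∀ (givenList : List Int) (start : Int), Dom_tailMax givenList start → Pre_tailMax givenList start → Spec_tailMax givenList start (tailMax givenList start)

-- ===== LEMMAS AND PROOFS =====

-- A's loop is the fold of its update step over the remaining index range.
lemma tailMaxLoop_eq_foldl (givenList : List Int) :
    ∀ (fuel : Nat) (count mc mv : Int),
      ((givenList.length : Int) - count).toNat ≤ fuel →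
      tailMaxLoop givenList fuel count mc mv =
        (PySem.List.pyRange count (givenList.length : Int) 1).foldl
          (fun s i => if s.2 < PySem.List.pyGetD givenList i 0 then (i, PySem.List.pyGetD givenList i 0) else s)
          (mc, mv) := by
  intro fuel
  induction fuel with
  | zero =>
    intro count mc mv h
    have hle : (givenList.length : Int) ≤ count := by omega
    rw [PySem.List.pyRange_one_eq_nil hle]
    rfl
  | succ f ih =>
    intro count mc mv h
    by_cases hc : count < (givenList.length : Int)
    · rw [PySem.List.pyRange_one_cons hc]
      simp only [tailMaxLoop, if_pos hc, List.foldl_cons]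
      by_cases hlt : mv < PySem.List.pyGetD givenList count 0
      · rw [if_pos hlt, if_pos hlt, ih _ _ _ (by omega)]
      · rw [if_neg hlt, if_neg hlt, ih _ _ _ (by omega)]
    · rw [PySem.List.pyRange_one_eq_nil (by omega)]
      simp only [tailMaxLoop, if_neg hc]
      rfl

-- Characterisation of the strict-update running-max fold: the result is (first index attaining
-- the overall max, that max) when the max beats the initial value, otherwise the initial state.
lemma fold_char (g : Int → Int) :
    ∀ (l : List Int) (c0 m0 : Int),
      l.foldl (fun s i => if s.2 < g i then (i, g i) else s) (c0, m0) =
        (if m0 < l.foldl (fun m j => max m (g j)) m0 then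
          ((l.find? (fun i => g i == l.foldl (fun m j => max m (g j)) m0)).getD c0,
            l.foldl (fun m j => max m (g j)) m0)
        else (c0, m0)) := by
  intro l
  induction l with
  | nil => intro c0 m0; simp
  | cons i l ih =>
    intro c0 m0
    simp only [List.foldl_cons]
    by_cases hi : m0 < g i
    · rw [if_pos hi, ih i (g i)]
      have hmax : max m0 (g i) = g i := by omega
      rw [hmax]
      set M := l.foldl (fun m j => max m (g j)) (g i) with hM
      have hgiM : g i ≤ M := by
        have := (PySem.List.le_foldl_max (l.map g) (g i)).1
        rwa [List.foldl_map] at this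
      by_cases h2 : g i < M
      · rw [if_pos h2, if_pos (by omega)]
        -- head does not attain M
        rw [List.find?_cons_of_neg (by simp; omega)]
        -- M is attained in l, so find? is some and the default is irrelevant
        have hMl : M ∈ l.map g := by
          have := PySem.List.foldl_max_mem (l.map g) (g i)
          rw [List.foldl_map] at this
          rcases this with h | h
          · omega
          · exact h
        rcases List.mem_map.mp hMl with ⟨j, hj, hgj⟩
        have : (l.find? (fun i => g i == M)).isSome := by
          rw [List.find?_isSome]
          exact ⟨j, hj, by simp [hgj]⟩
        rcases Option.isSome_iff_exists.mp this with ⟨k, hk⟩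
        rw [hk]
        rfl
      · have hMi : M = g i := by omega
        rw [if_neg h2, if_pos (by omega), hMi]
        rw [List.find?_cons_of_pos (by simp)]
        rfl
    · rw [if_neg hi, ih c0 m0]
      have hmax : max m0 (g i) = m0 := by omega
      rw [hmax]
      set M := l.foldl (fun m j => max m (g j)) m0 with hM
      by_cases h2 : m0 < M
      · rw [if_pos h2, if_pos h2]
        rw [List.find?_cons_of_neg (by simp; omega)]
      · rw [if_neg h2, if_neg h2]

-- ===== VERDICT (by name: the statement is the Claim_ definition above) =====
theorem tailMax_spec : Claim_equal_tailMax := by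
  intro givenList start _ hpre
  obtain ⟨hlo, hhi⟩ := hpre
  unfold Spec_tailMax tailMax tailMax_alt
  set g : Int → Int := fun i => PySem.List.pyGetD givenList i 0 with hg
  rw [tailMaxLoop_eq_foldl givenList _ start start (g start) (by omega)]
  rw [PySem.List.pyRange_one_cons hhi]
  rw [fold_char]
  simp only [List.foldl_cons, List.map_cons]
  have hself : max (g start) (g start) = g start := by omega
  rw [hself]
  set M := (PySem.List.pyRange (start + 1) (givenList.length : Int) 1).foldl
      (fun m j => max m (g j)) (g start) with hM
  -- B's maxValue is M
  have hmaxv : (PySem.List.max?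
      (g start :: (PySem.List.pyRange (start + 1) (givenList.length : Int) 1).map g)
      (fun y => y)).getD 0 = M := by
    rw [PySem.List.max?_id_cons, List.foldl_map]
    rfl
  rw [hmaxv]
  have hle : g start ≤ M := by
    have := (PySem.List.le_foldl_max
      ((PySem.List.pyRange (start + 1) (givenList.length : Int) 1).map g) (g start)).1
    rwa [List.foldl_map] at this
  by_cases h : g start < M
  · rw [if_pos h]
    rw [List.find?_cons_of_neg (by
      have h' : PySem.List.pyGetD givenList start 0 < M := h
      simp; omega)]
    have hMl : M ∈ (PySem.List.pyRange (start + 1) (givenList.length : Int) 1).map g := by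
      have := PySem.List.foldl_max_mem
        ((PySem.List.pyRange (start + 1) (givenList.length : Int) 1).map g) (g start)
      rw [List.foldl_map] at this
      rcases this with h' | h'
      · omega
      · exact h'
    rcases List.mem_map.mp hMl with ⟨j, hj, hgj⟩
    have : ((PySem.List.pyRange (start + 1) (givenList.length : Int) 1).find?
        (fun i => g i == M)).isSome := by
      rw [List.find?_isSome]
      exact ⟨j, hj, by simp [hgj]⟩
    rcases Option.isSome_iff_exists.mp this with ⟨k, hk⟩
    rw [hk]
    rfl
  · rw [if_neg h]
    have hMi : M = g start := by omega
    rw [hMi, List.find?_cons_of_pos (by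
      have h' : PySem.List.pyGetD givenList start 0 = g start := rfl
      simp [h'])]
    rfl
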